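-- pv_equiv track=rewrite | github.com/3sem/fltp | p3/CYK_graph_naive.py | search_lhs_terminal_rule
-- ===== SOURCE A (Python) =====
-- G={
--     'A':[['a']],
--     'B':[['d']],
--     'C':[['c']],
--     'D':[['A','B']],
--     'E':[['B','C']],
--     'S':[['D','E']]
--  }
--
-- def search_lhs_terminal_rule(term=None):
--     if not term:
--         return []
--     res = []
--     for k,v in G.items():
--         for rhs_item in v:
--             if len(rhs_item) == 1:
--                 if term == rhs_item[0]:
--                     res.append(k)
--     return res
-- ===== SOURCE B (Python) =====
-- G={
--     'A':[['a']],
--     'B':[['d']],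
--     'C':[['c']],
--     'D':[['A','B']],
--     'E':[['B','C']],
--     'S':[['D','E']]
--  }
--
-- # Precomputed index: terminal -> LHS nonterminals (in G's insertion order), built once.
-- TERMINAL_INDEX = {}
-- for _k, _v in G.items():
--     for _rhs in _v:
--         if len(_rhs) == 1:
--             TERMINAL_INDEX.setdefault(_rhs[0], []).append(_k)
--
-- def search_lhs_terminal_rule(term=None):
--     return list(TERMINAL_INDEX.get(term, []))
-- ===== Notes on version B (the rewrite author's own statement) =====
-- stated objective: idiomatic
-- what changed: Replaces the per-call nested scan over G with a module-level terminal->LHS index dict built once at import; the function body becomes a single dict lookup with [] default.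
import Mathlib
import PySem

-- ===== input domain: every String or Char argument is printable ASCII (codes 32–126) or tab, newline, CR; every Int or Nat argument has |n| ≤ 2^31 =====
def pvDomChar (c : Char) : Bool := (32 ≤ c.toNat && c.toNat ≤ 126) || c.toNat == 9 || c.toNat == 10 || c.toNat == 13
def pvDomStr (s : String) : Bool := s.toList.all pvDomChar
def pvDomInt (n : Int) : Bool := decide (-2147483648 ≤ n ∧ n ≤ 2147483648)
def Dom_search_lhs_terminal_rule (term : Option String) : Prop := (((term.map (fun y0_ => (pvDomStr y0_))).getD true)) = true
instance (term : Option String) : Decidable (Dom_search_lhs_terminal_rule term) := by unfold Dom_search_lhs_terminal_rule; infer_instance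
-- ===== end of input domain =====

-- B builds a terminal->LHS index dict once and makes the function a single lookup (idiomatic; return values only — no mutation involved).

-- ===== PORT A =====
-- module-level grammar G
def pvG : PySem.Dict String (List (List String)) :=
  PySem.Dict.ofList [("A", [["a"]]), ("B", [["d"]]), ("C", [["c"]]),
                     ("D", [["A","B"]]), ("E", [["B","C"]]), ("S", [["D","E"]])]

def search_lhs_terminal_rule (term : Option String) : List String :=
  -- `if not term: return []`  (None or empty string)
  match term with
  | none => []
  | some t =>
    if t = "" then []
    else
      -- for k,v in G.items(): for rhs_item in v: if len(rhs_item)==1: if term==rhs_item[0]: res.append(k)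
      pvG.items.foldl (fun res kv =>
        kv.2.foldl (fun res rhs =>
          if rhs.length = 1 then
            if some t = PySem.List.pyGet? rhs 0 then res ++ [kv.1] else res
          else res) res) []

-- ===== PORT B =====
-- TERMINAL_INDEX built once by one pass over G (setdefault-append ≡ Dict.modify with default [])
def pvTerminalIndex : PySem.Dict String (List String) :=
  pvG.items.foldl (fun d kv =>
    kv.2.foldl (fun d rhs =>
      if rhs.length = 1 then
        d.modify ((PySem.List.pyGet? rhs 0).getD "") [] (· ++ [kv.1])
      else d) d) PySem.Dict.empty

def search_lhs_terminal_rule_alt (term : Option String) : List String :=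
  -- return list(TERMINAL_INDEX.get(term, []))  (term=None is never a key → [])
  match term with
  | none => []
  | some t => pvTerminalIndex.getD t []

-- ===== PRECONDITION & SPEC =====
def Spec_search_lhs_terminal_rule (term : Option String) (out : List String) : Prop := out = search_lhs_terminal_rule_alt term
instance (term : Option String) (out : List String) : Decidable (Spec_search_lhs_terminal_rule term out) := by unfold Spec_search_lhs_terminal_rule; infer_instance

-- ===== CLAIM (what is proved, stated in full; the proofs are below) =====
def Claim_equal_search_lhs_terminal_rule : Prop := ∀ (term : Option String), Dom_search_lhs_terminal_rule term → Spec_search_lhs_terminal_rule term (search_lhs_terminal_rule term)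

-- ===== LEMMAS AND PROOFS =====
theorem pv_items : pvG.items =
    [("A", [["a"]]), ("B", [["d"]]), ("C", [["c"]]),
     ("D", [["A","B"]]), ("E", [["B","C"]]), ("S", [["D","E"]])] := by decide

theorem pv_index : pvTerminalIndex = PySem.Dict.mk [("a",["A"]),("d",["B"]),("c",["C"])] := by
  decide

theorem pv_eq_some (t : String) :
    search_lhs_terminal_rule (some t) = search_lhs_terminal_rule_alt (some t) := by
  by_cases ha : t = "a"
  · subst ha; decide
  by_cases hd : t = "d"
  · subst hd; decide
  by_cases hc : t = "c"
  · subst hc; decide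
  by_cases he : t = ""
  · subst he; decide
  · show search_lhs_terminal_rule (some t) = search_lhs_terminal_rule_alt (some t)
    simp only [search_lhs_terminal_rule, search_lhs_terminal_rule_alt, pv_items, pv_index, he]
    have h1 : (("a":String) == t) = false := beq_eq_false_iff_ne.mpr (fun h => ha h.symm)
    have h2 : (("d":String) == t) = false := beq_eq_false_iff_ne.mpr (fun h => hd h.symm)
    have h3 : (("c":String) == t) = false := beq_eq_false_iff_ne.mpr (fun h => hc h.symm)
    simp [List.foldl, PySem.List.pyGet?, PySem.List.pyIdx?, PySem.Dict.getD, PySem.Dict.get?,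
      List.find?, ha, hd, hc, h1, h2, h3]

-- ===== VERDICT (by name: the statement is the Claim_ definition above) =====
theorem search_lhs_terminal_rule_spec : Claim_equal_search_lhs_terminal_rule := by
  intro term _
  unfold Spec_search_lhs_terminal_rule
  cases term with
  | none => rfl
  | some t => exact (pv_eq_some t).symm ▸ rfl
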